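-- pv_equiv track=rewrite | github.com/FernE047/SrcLbMaker | LbMaker.py | lbOrder
-- ===== SOURCE A (Python) =====
-- def lbOrder(runners,info):
--     lbNumbers = []
--     for runner in list(runners.values()):
--         if info in runner:
--             if runner[info] not in lbNumbers:
--                 lbNumbers.append(runner[info])
--     lbNumbers.sort()
--     lbNumbers = reversed(lbNumbers)
--     lbRunners = []
--     for number in lbNumbers:
--         for runner in list(runners.values()):
--             if info in runner:
--                 if runner[info] == number:
--                     lbRunners.append(runner)
--     return lbRunners
-- ===== SOURCE B (Python) =====
-- def lbOrder(runners, info):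
--     groups = {}
--     for runner in runners.values():
--         if info in runner:
--             groups.setdefault(runner[info], []).append(runner)
--     lbRunners = []
--     for number in sorted(groups, reverse=True):
--         lbRunners.extend(groups[number])
--     return lbRunners
-- ===== Notes on version B (the rewrite author's own statement) =====
-- stated objective: alternative
-- what changed: Replaces A's per-distinct-value rescans of all runners with a single grouping pass into a dict keyed by the info value, then one sort of the distinct keys emitted in descending order.
import Mathlib
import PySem

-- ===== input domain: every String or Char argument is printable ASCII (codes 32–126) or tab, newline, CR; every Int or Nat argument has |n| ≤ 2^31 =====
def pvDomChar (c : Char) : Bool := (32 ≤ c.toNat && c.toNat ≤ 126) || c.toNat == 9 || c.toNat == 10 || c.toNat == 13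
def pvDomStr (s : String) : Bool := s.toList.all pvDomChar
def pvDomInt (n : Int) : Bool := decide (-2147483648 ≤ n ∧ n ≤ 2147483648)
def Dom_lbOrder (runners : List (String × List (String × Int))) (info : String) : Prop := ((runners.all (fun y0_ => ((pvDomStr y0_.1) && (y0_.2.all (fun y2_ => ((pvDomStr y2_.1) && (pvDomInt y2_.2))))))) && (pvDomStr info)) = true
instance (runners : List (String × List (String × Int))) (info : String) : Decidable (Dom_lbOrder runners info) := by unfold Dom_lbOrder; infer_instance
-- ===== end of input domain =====

-- B groups runners by info value in one pass and emits groups by descending key,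
-- replacing A's rescans of all runners once per distinct value (objective: alternative).


-- ===== PORT A =====
-- 'runners' is a Python dict of dicts: decode the assoc lists with Dict.ofList
-- (duplicate keys collapse exactly as Python's dict literal/constructor does).
def lbOrder (runners : List (String × List (String × Int))) (info : String) : List (List (String × Int)) :=
  let vals : List (PySem.Dict String Int) :=
    ((PySem.Dict.ofList runners).values).map (fun r => PySem.Dict.ofList r)
  -- for runner in list(runners.values()): if info in runner: if runner[info] not in lbNumbers: append
  let lbNumbers : List Int :=
    vals.foldl (fun acc runner =>
      if runner.contains info then
        (if acc.contains (runner.getD info 0) then acc else acc ++ [runner.getD info 0])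
      else acc) []
  -- lbNumbers.sort(); lbNumbers = reversed(lbNumbers)
  let numbers := (PySem.List.sorted lbNumbers (fun x => x) false).reverse
  -- nested loops appending every runner whose info value equals the current number
  numbers.foldl (fun acc number =>
    vals.foldl (fun acc2 runner =>
      if runner.contains info then
        (if runner.getD info 0 == number then acc2 ++ [runner.items] else acc2)
      else acc2) acc) []

-- ===== PORT B =====
-- one grouping pass: groups.setdefault(runner[info], []).append(runner), then
-- emit groups for the keys sorted in reverse order.
def lbOrder_alt (runners : List (String × List (String × Int))) (info : String) : List (List (String × Int)) :=
  let vals : List (PySem.Dict String Int) :=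
    ((PySem.Dict.ofList runners).values).map (fun r => PySem.Dict.ofList r)
  let groups : PySem.Dict Int (List (List (String × Int))) :=
    vals.foldl (fun g runner =>
      match runner.get? info with
      | some v => g.modify v [] (fun l => l ++ [runner.items])
      | none => g) PySem.Dict.empty
  (PySem.List.sorted groups.keys (fun x => x) true).flatMap (fun k => groups.getD k [])

-- ===== PRECONDITION & SPEC =====
def Spec_lbOrder (runners : List (String × List (String × Int))) (info : String) (out : List (List (String × Int))) : Prop := out = lbOrder_alt runners info
instance (runners : List (String × List (String × Int))) (info : String) (out : List (List (String × Int))) : Decidable (Spec_lbOrder runners info out) := by unfold Spec_lbOrder; infer_instance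

-- ===== CLAIM (what is proved, stated in full; the proofs are below) =====
def Claim_equal_lbOrder : Prop := ∀ (runners : List (String × List (String × Int))) (info : String), Dom_lbOrder runners info → Spec_lbOrder runners info (lbOrder runners info)

-- ===== LEMMAS AND PROOFS =====

-- the (value, items) pairs of the runners that contain 'info', in encounter order
def pvPairs (vals : List (PySem.Dict String Int)) (info : String) : List (Int × List (String × Int)) :=
  vals.filterMap (fun r => (r.get? info).map (fun v => (v, r.items)))

lemma pvPairs_cons_none {r : PySem.Dict String Int} {info : String}
    (t : List (PySem.Dict String Int)) (hr : r.get? info = none) :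
    pvPairs (r :: t) info = pvPairs t info := by
  simp [pvPairs, hr]

lemma pvPairs_cons_some {r : PySem.Dict String Int} {info : String} {v : Int}
    (t : List (PySem.Dict String Int)) (hr : r.get? info = some v) :
    pvPairs (r :: t) info = (v, r.items) :: pvPairs t info := by
  simp [pvPairs, hr]

-- A's first loop collects exactly the distinct info values, in first-seen order
lemma lbNumbers_eq (vals : List (PySem.Dict String Int)) (info : String) (acc : List Int) :
    vals.foldl (fun acc runner =>
      if runner.contains info then
        (if acc.contains (runner.getD info 0) then acc else acc ++ [runner.getD info 0])
      else acc) acc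
      = ((pvPairs vals info).map (·.1)).foldl PySem.Set.add acc := by
  induction vals generalizing acc with
  | nil => rfl
  | cons r t ih =>
      cases hr : r.get? info with
      | none =>
          have hc : r.contains info = false := by
            rw [PySem.Dict.contains_eq_isSome_get?, hr]; rfl
          rw [pvPairs_cons_none t hr, List.foldl_cons, if_neg (by simp [hc])]
          exact ih acc
      | some v =>
          have hc : r.contains info = true := by
            rw [PySem.Dict.contains_eq_isSome_get?, hr]; rfl
          have hd : r.getD info 0 = v := by rw [PySem.Dict.getD_eq_get?_getD, hr]; rfl
          rw [pvPairs_cons_some t hr, List.map_cons, List.foldl_cons, List.foldl_cons,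
            if_pos (by simp [hc]), hd]
          rw [ih]
          congr 1

-- A's inner rescan appends exactly the group of 'number', in encounter order
lemma inner_loop_eq (vals : List (PySem.Dict String Int)) (info : String)
    (number : Int) (acc : List (List (String × Int))) :
    vals.foldl (fun acc2 runner =>
      if runner.contains info then
        (if runner.getD info 0 == number then acc2 ++ [runner.items] else acc2)
      else acc2) acc
      = acc ++ ((pvPairs vals info).filter (fun p => p.1 == number)).map (·.2) := by
  induction vals generalizing acc with
  | nil => simp [pvPairs]
  | cons r t ih =>
      cases hr : r.get? info with
      | none =>
          have hc : r.contains info = false := by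
            rw [PySem.Dict.contains_eq_isSome_get?, hr]; rfl
          rw [pvPairs_cons_none t hr, List.foldl_cons, if_neg (by simp [hc])]
          exact ih acc
      | some v =>
          have hc : r.contains info = true := by
            rw [PySem.Dict.contains_eq_isSome_get?, hr]; rfl
          have hd : r.getD info 0 = v := by rw [PySem.Dict.getD_eq_get?_getD, hr]; rfl
          rw [pvPairs_cons_some t hr, List.foldl_cons, if_pos (by simp [hc]), hd]
          by_cases hv : v = number
          · rw [if_pos (by simp [hv]), ih]
            simp [hv]
          · rw [if_neg (by simp [hv]), ih]
            simp [hv]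

-- A's outer loop over the sorted numbers concatenates the groups
lemma outer_loop_eq (vals : List (PySem.Dict String Int)) (info : String)
    (numbers : List Int) (acc : List (List (String × Int))) :
    numbers.foldl (fun acc number =>
      vals.foldl (fun acc2 runner =>
        if runner.contains info then
          (if runner.getD info 0 == number then acc2 ++ [runner.items] else acc2)
        else acc2) acc) acc
      = acc ++ numbers.flatMap
          (fun k => ((pvPairs vals info).filter (fun p => p.1 == k)).map (·.2)) := by
  induction numbers generalizing acc with
  | nil => simp
  | cons n t ih =>
      rw [List.foldl_cons, inner_loop_eq, ih, List.flatMap_cons, List.append_assoc]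

-- B's grouping loop is the pair-keyed modify loop over pvPairs
lemma groups_eq (vals : List (PySem.Dict String Int)) (info : String)
    (g : PySem.Dict Int (List (List (String × Int)))) :
    vals.foldl (fun g runner =>
      match runner.get? info with
      | some v => g.modify v [] (fun l => l ++ [runner.items])
      | none => g) g
      = (pvPairs vals info).foldl (fun d p => d.modify p.1 [] (fun l => l ++ [p.2])) g := by
  induction vals generalizing g with
  | nil => rfl
  | cons r t ih =>
      cases hr : r.get? info with
      | none =>
          rw [pvPairs_cons_none t hr, List.foldl_cons, hr]
          exact ih g
      | some v =>
          rw [pvPairs_cons_some t hr, List.foldl_cons, List.foldl_cons, hr]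
          exact ih _

theorem lbOrder_spec : Claim_equal_lbOrder := by
  intro runners info _
  unfold Spec_lbOrder lbOrder lbOrder_alt
  dsimp only
  set vals := ((PySem.Dict.ofList runners).values).map (fun r => PySem.Dict.ofList r) with hvals
  set ps := pvPairs vals info with hps
  set vs : List Int := ps.map (·.1) with hvs
  -- identify the two dedup'd key lists
  have hnum : (vals.foldl (fun acc runner =>
      if runner.contains info then
        (if acc.contains (runner.getD info 0) then acc else acc ++ [runner.getD info 0])
      else acc) []) = PySem.Set.ofList vs := by
    rw [lbNumbers_eq, PySem.Set.ofList_eq_foldl]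
  have hg : (vals.foldl (fun g runner =>
      match runner.get? info with
      | some v => g.modify v [] (fun l => l ++ [runner.items])
      | none => g) PySem.Dict.empty)
      = ps.foldl (fun d p => d.modify p.1 [] (fun l => l ++ [p.2])) PySem.Dict.empty :=
    groups_eq vals info _
  rw [hnum, hg]
  set G := ps.foldl (fun d p => d.modify p.1 [] (fun l => l ++ [p.2])) PySem.Dict.empty with hG
  have hkeys : G.keys = PySem.Set.ofList vs := by
    rw [hG, PySem.Dict.keys_foldl_modify_key]
    simp [PySem.Set.update_eq_foldl, PySem.Set.ofList_eq_foldl, PySem.Dict.keys_empty, hvs]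
  have hnodup : (PySem.Set.ofList vs).Nodup := PySem.Set.nodup_ofList vs
  -- descending sort = reverse of ascending sort, on a duplicate-free list
  have hsortrev : PySem.List.sorted (PySem.Set.ofList vs) (fun x => x) true
      = (PySem.List.sorted (PySem.Set.ofList vs) (fun x => x) false).reverse := by
    apply PySem.List.sorted_rev_eq_of_perm_of_pairwise_gt
    · exact (List.reverse_perm _).trans (PySem.List.sorted_perm _ _ _)
    · rw [List.pairwise_reverse]
      have hle := PySem.List.sorted_pairwise (PySem.Set.ofList vs) (fun x => x)
      have hne : (PySem.List.sorted (PySem.Set.ofList vs) (fun x => x) false).Nodup :=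
        ((PySem.List.sorted_perm _ _ _).nodup_iff).mpr hnodup
      exact (hne.and hle).imp (fun h => lt_of_le_of_ne h.2 h.1)
  -- A's nested loops = flatMap of the groups
  rw [outer_loop_eq, hkeys, hsortrev]
  have hgetD : ∀ k : Int, G.getD k [] = (ps.filter (fun p => p.1 == k)).map (·.2) := by
    intro k
    rw [hG, PySem.Dict.getD_foldl_modify_append]
    simp [PySem.Dict.getD_empty]
  simp only [hgetD, hps, List.nil_append]
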